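-- pv_equiv track=rewrite | github.com/mdhatmaker/Misc-python | interview-prep/geeks_for_geeks/bit_magic/sparse_number.py | is_sparse_number
-- ===== SOURCE A (Python) =====
-- def is_sparse_number(n):
--     maxones = 0
--     b = n
--     count = 0
--     while b > 0:
--         if b & 1:
--             count += 1
--             if count >= 2:
--                 return False
--         else:
--             count = 0
--         b = b >> 1
--     return True
-- ===== SOURCE B (Python) =====
-- def is_sparse_number(n):
--     return n <= 0 or (n & (n >> 1)) == 0
-- ===== Notes on version B (the rewrite author's own statement) =====
-- stated objective: idiomatic
-- what changed: Replaces the bit-by-bit loop with its consecutive-bit counter by the single closed-form mask test n & (n >> 1) == 0 (no iteration, no counter); a non-positivity guard keeps the loop's vacuous-True behaviour on non-positive inputs.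
import Mathlib
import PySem

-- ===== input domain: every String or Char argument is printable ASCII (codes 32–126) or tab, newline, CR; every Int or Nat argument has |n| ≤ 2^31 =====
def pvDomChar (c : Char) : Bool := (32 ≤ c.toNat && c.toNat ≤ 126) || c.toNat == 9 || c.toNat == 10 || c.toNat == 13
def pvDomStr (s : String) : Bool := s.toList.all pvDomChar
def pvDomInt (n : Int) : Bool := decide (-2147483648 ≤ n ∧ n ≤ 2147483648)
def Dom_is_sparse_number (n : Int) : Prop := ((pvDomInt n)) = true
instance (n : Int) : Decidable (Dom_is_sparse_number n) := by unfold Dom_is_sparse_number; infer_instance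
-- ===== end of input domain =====

-- B replaces A's bit-by-bit loop with the closed-form mask test n & (n >> 1) == 0 (idiomatic, no iteration).

-- ===== PORT A =====
-- the `while b > 0` loop of A, carrying the running `count` of consecutive set bits
def sparseLoop (b count : Int) : Bool :=
  if _h : b > 0 then
    if PySem.Int.band b 1 ≠ 0 then
      if count + 1 ≥ 2 then false
      else sparseLoop (b >>> (1 : Nat)) (count + 1)
    else sparseLoop (b >>> (1 : Nat)) 0
  else true
termination_by b.toNat
decreasing_by all_goals (simp [Int.shiftRight_eq_div_pow]; omega)

def is_sparse_number (n : Int) : Bool := sparseLoop n 0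

-- ===== PORT B =====
def is_sparse_number_alt (n : Int) : Bool :=
  decide (n ≤ 0) || (PySem.Int.band n (n >>> (1 : Nat)) == 0)

-- ===== PRECONDITION & SPEC =====
def Spec_is_sparse_number (n : Int) (out : Bool) : Prop := out = is_sparse_number_alt n
instance (n : Int) (out : Bool) : Decidable (Spec_is_sparse_number n out) := by unfold Spec_is_sparse_number; infer_instance

-- ===== CLAIM (what is proved, stated in full; the proofs are below) =====
def Claim_equal_is_sparse_number : Prop := ∀ (n : Int), Dom_is_sparse_number n → Spec_is_sparse_number n (is_sparse_number n)

-- ===== LEMMAS AND PROOFS =====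

-- `m &&& (m/2) = 0` says no two adjacent set bits
theorem land_half_eq_zero_iff (m : Nat) :
    m &&& (m / 2) = 0 ↔ ∀ i, ¬(m.testBit i = true ∧ m.testBit (i + 1) = true) := by
  constructor
  · intro h i ⟨h1, h2⟩
    have := congrArg (fun x => x.testBit i) h
    simp [Nat.testBit_and, Nat.testBit_div_two, h1, h2] at this
  · intro h
    apply Nat.eq_of_testBit_eq
    intro i
    simp [Nat.testBit_and, Nat.testBit_div_two]
    intro h1
    exact Bool.eq_false_iff.mpr (fun hc => h i ⟨h1, hc⟩)

-- peeling the low bit off the adjacent-bits condition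
theorem land_half_step (m : Nat) :
    m &&& (m / 2) = 0 ↔ ¬(m % 2 = 1 ∧ (m / 2) % 2 = 1) ∧ (m / 2) &&& (m / 2 / 2) = 0 := by
  rw [land_half_eq_zero_iff, land_half_eq_zero_iff]
  constructor
  · intro h
    refine ⟨?_, fun i hi => h (i + 1) ?_⟩
    · intro ⟨h0, h1⟩
      exact h 0 ⟨by simpa [Nat.testBit_zero] using h0,
        by simpa [Nat.testBit_succ, Nat.testBit_zero] using h1⟩
    · exact ⟨by simpa [Nat.testBit_succ] using hi.1, by simpa [Nat.testBit_succ] using hi.2⟩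
  · intro ⟨h0, h⟩ i hi
    cases i with
    | zero =>
      exact h0 ⟨by simpa [Nat.testBit_zero] using hi.1,
        by simpa [Nat.testBit_succ, Nat.testBit_zero] using hi.2⟩
    | succ j =>
      exact h j ⟨by simpa [Nat.testBit_succ] using hi.1,
        by simpa [Nat.testBit_succ] using hi.2⟩

theorem natCast_shiftRight_one (m : Nat) : ((m : Int) >>> (1 : Nat)) = ((m / 2 : Nat) : Int) := by
  simp [Int.shiftRight_eq_div_pow]

theorem band_one_natCast (m : Nat) : PySem.Int.band (↑m) 1 = ((m % 2 : Nat) : Int) := by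
  simp [PySem.Int.band_one, PySem.Int.mod, Int.fmod_eq_emod]

-- invariant of A's loop on nonnegative b: count ≥ 1 means the previous bit was set
theorem sparseLoop_eq (m : Nat) : ∀ c : Int, 0 ≤ c →
    sparseLoop (↑m) c =
      (!(decide (1 ≤ c) && decide (m % 2 = 1)) && decide (m &&& (m / 2) = 0)) := by
  induction m using Nat.strong_induction_on with
  | _ m ih =>
    intro c hc0
    rcases Nat.eq_zero_or_pos m with hm | hm
    · subst hm
      rw [sparseLoop]
      simp
    · rw [sparseLoop]
      have hpos : (0 : Int) < ↑m := by exact_mod_cast hm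
      rw [dif_pos hpos, band_one_natCast, natCast_shiftRight_one]
      have ihalf := ih (m / 2) (by omega)
      by_cases hodd : m % 2 = 1
      · rw [if_pos (by exact_mod_cast (by omega : ((m % 2 : Nat) : Int) ≠ 0))]
        by_cases hc : c + 1 ≥ 2
        · rw [if_pos hc]
          have h1c : (1 : Int) ≤ c := by omega
          simp [h1c, hodd]
        · rw [if_neg hc, ihalf _ (by omega)]
          have h1c : ¬(1 : Int) ≤ c := by omega
          have hstep := land_half_step m
          simp only [h1c, hodd] at *
          simp only [show (1 : Int) ≤ c + 1 by omega, decide_true, Bool.true_and,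
            decide_false, Bool.false_and, Bool.not_false, Bool.true_and] at *
          rcases Nat.eq_zero_or_pos ((m / 2) % 2) with h2 | h2
          · simp [h2, hstep]
          · have h2' : (m / 2) % 2 = 1 := by omega
            simp [h2', hstep]
      · have hev : m % 2 = 0 := by omega
        rw [if_neg (by simp [hev]), ihalf _ (by omega)]
        have hstep := land_half_step m
        simp only [hev] at hstep
        simp [hodd, hstep, show ¬(1:Int) ≤ 0 by omega]

theorem loop_eq_alt (n : Int) : sparseLoop n 0 = is_sparse_number_alt n := by
  unfold is_sparse_number_alt
  by_cases h : n ≤ 0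
  · rw [sparseLoop]
    rw [dif_neg (by omega : ¬ n > 0)]
    simp [h]
  · have hpos : 0 < n := by omega
    obtain ⟨m, rfl⟩ : ∃ m : Nat, n = ↑m := ⟨n.toNat, by omega⟩
    rw [sparseLoop_eq m 0 le_rfl, natCast_shiftRight_one,
      PySem.Int.band_natCast m (m / 2)]
    simp [show ¬(1:Int) ≤ 0 by omega, show m ≠ 0 by omega]
    by_cases h0 : m &&& m / 2 = 0 <;> simp [h0, Int.natCast_eq_zero]

-- ===== VERDICT (by name: the statement is the Claim_ definition above) =====
theorem is_sparse_number_spec : Claim_equal_is_sparse_number := by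
  intro n _
  unfold Spec_is_sparse_number is_sparse_number
  exact loop_eq_alt n
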